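-- pv_equiv track=rewrite | github.com/thanhdatduongwork/chat_bot | check_similarity.py | check_similarity_Levenstein
-- ===== SOURCE A (Python) =====
-- def extract_ngram(sentence, N):
--     sentence = sentence.split(" ")
--     grams = [sentence[i:i+N] for i in range(len(sentence)-N+1)]
--     return grams
--
-- def Levenstein_distance(s0, s1):
--     if s0 is None:
--         raise TypeError("Argument s0 is NoneType.")
--     if s1 is None:
--         raise TypeError("Argument s1 is NoneType.")
--     if s0 == s1:
--         return 0.0
--     if len(s0) == 0:
--         return len(s1)
--     if len(s1) == 0:
--         return len(s0)
--
--     v0 = [0] * (len(s1) + 1)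
--     v1 = [0] * (len(s1) + 1)
--
--     for i in range(len(v0)):
--         v0[i] = i
--
--     for i in range(len(s0)):
--         v1[0] = i + 1
--         for j in range(len(s1)):
--             cost = 1
--             if s0[i] == s1[j]:
--                 cost = 0
--             v1[j + 1] = min(v1[j] + 1, v0[j + 1] + 1, v0[j] + cost)
--         v0, v1 = v1, v0
--
--     return v0[len(s1)]
--
-- def check_similarity_Levenstein(entity, sentence):
--     n = len(entity.split(" "))
--     grams = extract_ngram(sentence, n)
--
--     for grams in grams:
--         grams = " ".join(grams)
--         distance = Levenstein_distance(grams, entity)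
--         if distance < 2:
--             return True
--     return False
-- ===== SOURCE B (Python) =====
-- def _within1(a, b):
--     # exact test "Levenshtein distance <= 1" without the DP table:
--     # strip the common prefix, then the remainders must match after one edit
--     if a == b:
--         return True
--     la, lb = len(a), len(b)
--     if abs(la - lb) > 1:
--         return False
--     i = 0
--     m = min(la, lb)
--     while i < m and a[i] == b[i]:
--         i += 1
--     if la == lb:
--         return a[i+1:] == b[i+1:]
--     if la > lb:
--         return a[i+1:] == b[i:]
--     return a[i:] == b[i+1:]
--
-- def check_similarity_Levenstein(entity, sentence):
--     words = sentence.split(" ")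
--     n = len(entity.split(" "))
--     return any(_within1(" ".join(words[i:i+n]), entity)
--                for i in range(len(words) - n + 1))
-- ===== Notes on version B (the rewrite author's own statement) =====
-- stated objective: faster
-- what changed: Replaces the full O(n*m) dynamic-programming Levenshtein table per ngram by a linear common-prefix strip that decides 'distance <= 1' directly (equal, or remainders equal after one substitution/insertion/deletion), and folds the explicit search loop into any().
import Mathlib
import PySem

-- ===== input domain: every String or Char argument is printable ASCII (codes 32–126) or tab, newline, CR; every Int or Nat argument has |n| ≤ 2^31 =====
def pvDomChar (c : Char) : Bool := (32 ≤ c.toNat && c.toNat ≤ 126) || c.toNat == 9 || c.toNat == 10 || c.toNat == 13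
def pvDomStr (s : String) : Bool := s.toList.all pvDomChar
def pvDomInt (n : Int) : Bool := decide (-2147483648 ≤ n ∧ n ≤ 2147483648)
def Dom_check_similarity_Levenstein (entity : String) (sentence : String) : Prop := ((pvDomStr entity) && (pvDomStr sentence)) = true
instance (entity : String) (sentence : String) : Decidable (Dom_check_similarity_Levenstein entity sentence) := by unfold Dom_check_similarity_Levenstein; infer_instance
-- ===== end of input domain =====

-- B replaces the per-ngram O(n*m) DP Levenshtein table by a linear common-prefix
-- strip deciding 'distance <= 1' directly (objective: faster, asymptotically).

-- ===== PORT A =====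

-- inner 'for j in range(len(s1))' loop of Levenstein_distance: computes v1[1..];
-- 'left' is the previously written v1[j], 'prev' holds v0[j], v0[j+1], … (consumed head-first)
def pvA_row (a : Char) : List Char → List Int → Int → List Int
  | [], _, _ => []
  | b :: t, d :: prev, left =>
      let cost : Int := if a = b then 0 else 1
      let x := min (left + 1) (min ((prev.headD 0) + 1) (d + cost))
      x :: pvA_row a t prev x
  | _ :: _, [], _ => []  -- unreachable: prev always has length |t|+1

-- outer 'for i in range(len(s0))' loop: v1[0] = i + 1, then the inner loop; swap v0, v1
def pvA_loop : List Char → List Char → Int → List Int → List Int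
  | [], _, _, v0 => v0
  | a :: s, t, i, v0 => pvA_loop s t (i + 1) ((i + 1) :: pvA_row a t v0 (i + 1))

-- Levenstein_distance (returns an Int; Python's '0.0' in the equal branch is 0 —
-- only the comparison 'distance < 2' is observed)
def pvA_Levenstein (s0 s1 : List Char) : Int :=
  if s0 = s1 then 0
  else if s0.length = 0 then s1.length
  else if s1.length = 0 then s0.length
  else
    let v0 := PySem.List.pyRange 0 ((s1.length : Int) + 1) 1  -- v0[i] = i
    (PySem.List.pyGet? (pvA_loop s0 s1 0 v0) (s1.length : Int)).getD 0

def pv_extract_ngram (sentence : List Char) (N : Int) : List (List (List Char)) :=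
  let ws := PySem.Chars.splitOn sentence " ".toList
  (PySem.List.pyRange 0 ((ws.length : Int) - N + 1) 1).map
    (fun i => PySem.List.slice ws (some i) (some (i + N)))

-- 'for grams in grams: … if distance < 2: return True' / 'return False'
def pvA_main (entity : List Char) : List (List (List Char)) → Bool
  | [] => false
  | g :: gs =>
      if pvA_Levenstein (PySem.Chars.join " ".toList g) entity < 2 then true
      else pvA_main entity gs

def check_similarity_Levenstein (entity : String) (sentence : String) : Bool :=
  let n : Int := ((PySem.Chars.splitOn entity.toList " ".toList).length : Int)
  pvA_main entity.toList (pv_extract_ngram sentence.toList n)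

-- ===== PORT B =====

-- the 'while i < m and a[i] == b[i]' loop of _within1: returns (a[i:], b[i:])
def pvB_strip : List Char → List Char → List Char × List Char
  | a :: u, b :: v => if a = b then pvB_strip u v else (a :: u, b :: v)
  | u, v => (u, v)

-- _within1: "Levenshtein distance <= 1" via one linear scan
def pvB_within1 (a b : List Char) : Bool :=
  if a = b then true
  else if ((a.length : Int) - (b.length : Int)).natAbs > 1 then false
  else
    let p := pvB_strip a b
    if a.length = b.length then p.1.tail == p.2.tail
    else if a.length > b.length then p.1.tail == p.2
    else p.1 == p.2.tail

def check_similarity_Levenstein_alt (entity : String) (sentence : String) : Bool :=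
  let ws := PySem.Chars.splitOn sentence.toList " ".toList
  let n : Int := ((PySem.Chars.splitOn entity.toList " ".toList).length : Int)
  (PySem.List.pyRange 0 ((ws.length : Int) - n + 1) 1).any
    (fun i => pvB_within1
      (PySem.Chars.join " ".toList (PySem.List.slice ws (some i) (some (i + n))))
      entity.toList)

-- ===== PRECONDITION & SPEC =====
def Spec_check_similarity_Levenstein (entity : String) (sentence : String) (out : Bool) : Prop := out = check_similarity_Levenstein_alt entity sentence
instance (entity : String) (sentence : String) (out : Bool) : Decidable (Spec_check_similarity_Levenstein entity sentence out) := by unfold Spec_check_similarity_Levenstein; infer_instance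

-- ===== CLAIM (what is proved, stated in full; the proofs are below) =====
def Claim_equal_check_similarity_Levenstein : Prop := ∀ (entity : String) (sentence : String), Dom_check_similarity_Levenstein entity sentence → Spec_check_similarity_Levenstein entity sentence (check_similarity_Levenstein entity sentence)

-- ===== LEMMAS AND PROOFS =====

-- reference Levenshtein distance (cons recurrence, branch order matching A's min)
def pvLev : List Char → List Char → Nat
  | [], v => v.length
  | _ :: u, [] => u.length + 1
  | a :: u, b :: v =>
      min (pvLev (a :: u) v + 1)
        (min (pvLev u (b :: v) + 1) (pvLev u v + (if a = b then 0 else 1)))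
  termination_by u v => u.length + v.length

theorem pvLev_nil_right (u : List Char) : pvLev u [] = u.length := by
  cases u <;> simp [pvLev]

theorem pvLev_cons_cons (a b : Char) (u v : List Char) :
    pvLev (a :: u) (b :: v)
      = min (pvLev (a :: u) v + 1)
          (min (pvLev u (b :: v) + 1) (pvLev u v + (if a = b then 0 else 1))) := by
  rw [pvLev]

theorem pvLev_eq_zero (u : List Char) : ∀ v, pvLev u v = 0 ↔ u = v := by
  induction u with
  | nil => intro v; cases v <;> simp [pvLev]
  | cons a u ih =>
    intro v
    cases v with
    | nil => simp [pvLev]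
    | cons b v =>
      rw [pvLev_cons_cons]
      have ihv := ih v
      constructor
      · intro h
        by_cases hab : a = b
        · subst hab
          rw [if_pos rfl] at h
          have : pvLev u v = 0 := by omega
          simp [ihv.mp this]
        · rw [if_neg hab] at h
          omega
      · intro h
        cases h
        rw [if_pos rfl]
        have h0 : pvLev u u = 0 := (ih u).mpr rfl
        omega

theorem pvLev_self (u : List Char) : pvLev u u = 0 := (pvLev_eq_zero u u).mpr rfl

theorem pvLev_cons_self_le (x : Char) (v : List Char) : pvLev (x :: v) v ≤ 1 := by
  cases v with
  | nil => simp [pvLev]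
  | cons c v =>
    rw [pvLev_cons_cons]
    have h := pvLev_self (c :: v)
    omega

theorem pvLev_self_cons_le (x : Char) (v : List Char) : pvLev v (x :: v) ≤ 1 := by
  cases v with
  | nil => simp [pvLev]
  | cons c v =>
    rw [pvLev_cons_cons]
    have h := pvLev_self (c :: v)
    omega

theorem pvLev_cons_cons_le_one (x : Char) (u v : List Char) :
    pvLev (x :: u) (x :: v) ≤ 1 ↔ pvLev u v ≤ 1 := by
  rw [pvLev_cons_cons, if_pos rfl]
  constructor
  · intro h
    rcases Nat.lt_or_ge (pvLev u v) 2 with h1 | h1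
    · omega
    rcases Nat.lt_or_ge (pvLev (x :: u) v) 1 with h2 | h2
    · have := (pvLev_eq_zero (x :: u) v).mp (by omega)
      subst this
      have := pvLev_self_cons_le x u
      omega
    rcases Nat.lt_or_ge (pvLev u (x :: v)) 1 with h3 | h3
    · have := (pvLev_eq_zero u (x :: v)).mp (by omega)
      subst this
      have := pvLev_cons_self_le x v
      omega
    · omega
  · intro h
    omega

-- "distance ≤ 1" as a decomposition: equal, one substitution, one deletion or one insertion
def pvClose (u v : List Char) : Prop :=
  u = v ∨ (∃ p a b q, u = p ++ a :: q ∧ v = p ++ b :: q)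
    ∨ (∃ p a q, u = p ++ a :: q ∧ v = p ++ q)
    ∨ (∃ p a q, u = p ++ q ∧ v = p ++ a :: q)

theorem pvLev_cons_both_le (c : Char) (u v : List Char) (h : pvLev u v ≤ 1) :
    pvLev (c :: u) (c :: v) ≤ 1 := (pvLev_cons_cons_le_one c u v).mpr h

theorem pvLev_del_le (p q : List Char) (a : Char) : pvLev (p ++ a :: q) (p ++ q) ≤ 1 := by
  induction p with
  | nil => simpa using pvLev_cons_self_le a q
  | cons c p ih => exact pvLev_cons_both_le c _ _ ih

theorem pvLev_ins_le (p q : List Char) (a : Char) : pvLev (p ++ q) (p ++ a :: q) ≤ 1 := by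
  induction p with
  | nil => simpa using pvLev_self_cons_le a q
  | cons c p ih => exact pvLev_cons_both_le c _ _ ih

theorem pvLev_sub_le (p q : List Char) (a b : Char) :
    pvLev (p ++ a :: q) (p ++ b :: q) ≤ 1 := by
  induction p with
  | nil =>
    by_cases hab : a = b
    · subst hab; simp [pvLev_self]
    · have h := pvLev_self q
      simp only [List.nil_append]
      rw [pvLev_cons_cons, if_neg hab]
      omega
  | cons c p ih => exact pvLev_cons_both_le c _ _ ih

theorem pvClose_lev (u v : List Char) (h : pvClose u v) : pvLev u v ≤ 1 := by
  rcases h with h | ⟨p, a, b, q, hu, hv⟩ | ⟨p, a, q, hu, hv⟩ | ⟨p, a, q, hu, hv⟩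
  · subst h; simp [pvLev_self]
  · subst hu; subst hv; exact pvLev_sub_le p q a b
  · subst hu; subst hv; exact pvLev_del_le p q a
  · subst hu; subst hv; exact pvLev_ins_le p q a

theorem pvClose_cons (c : Char) (u v : List Char) (h : pvClose u v) :
    pvClose (c :: u) (c :: v) := by
  rcases h with h | ⟨p, a, b, q, hu, hv⟩ | ⟨p, a, q, hu, hv⟩ | ⟨p, a, q, hu, hv⟩
  · subst h; exact Or.inl rfl
  · subst hu; subst hv; exact Or.inr (Or.inl ⟨c :: p, a, b, q, rfl, rfl⟩)
  · subst hu; subst hv; exact Or.inr (Or.inr (Or.inl ⟨c :: p, a, q, rfl, rfl⟩))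
  · subst hu; subst hv; exact Or.inr (Or.inr (Or.inr ⟨c :: p, a, q, rfl, rfl⟩))

theorem pvLev_close (u : List Char) : ∀ v, pvLev u v ≤ 1 → pvClose u v := by
  induction u with
  | nil =>
    intro v h
    cases v with
    | nil => exact Or.inl rfl
    | cons b v =>
      simp only [pvLev, List.length_cons] at h
      have : v = [] := by
        cases v with
        | nil => rfl
        | cons c w => simp at h
      subst this
      exact Or.inr (Or.inr (Or.inr ⟨[], b, [], rfl, rfl⟩))
  | cons a u ih =>
    intro v h
    cases v with
    | nil =>
      simp only [pvLev] at h
      have : u = [] := List.length_eq_zero_iff.mp (by omega)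
      subst this
      exact Or.inr (Or.inr (Or.inl ⟨[], a, [], rfl, rfl⟩))
    | cons b v =>
      rw [pvLev_cons_cons] at h
      rcases Nat.lt_or_ge (pvLev (a :: u) v) 1 with h1 | h1
      case inl =>
        have := (pvLev_eq_zero (a :: u) v).mp (by omega)
        subst this
        exact Or.inr (Or.inr (Or.inr ⟨[], b, a :: u, rfl, rfl⟩))
      rcases Nat.lt_or_ge (pvLev u (b :: v)) 1 with h2 | h2
      case inl =>
        have := (pvLev_eq_zero u (b :: v)).mp (by omega)
        subst this
        exact Or.inr (Or.inr (Or.inl ⟨[], a, b :: v, rfl, rfl⟩))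
      by_cases hab : a = b
      · subst hab
        have hle : pvLev u v ≤ 1 := by
          rw [if_pos rfl] at h
          omega
        exact pvClose_cons a u v (ih v hle)
      · have h0 : pvLev u v = 0 := by
          simp only [if_neg hab] at h
          omega
        have := (pvLev_eq_zero u v).mp h0
        subst this
        exact Or.inr (Or.inl ⟨[], a, b, u, rfl, rfl⟩)

theorem pvClose_reverse (u v : List Char) (h : pvClose u v) :
    pvClose u.reverse v.reverse := by
  rcases h with h | ⟨p, a, b, q, hu, hv⟩ | ⟨p, a, q, hu, hv⟩ | ⟨p, a, q, hu, hv⟩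
  · subst h; exact Or.inl rfl
  · subst hu; subst hv
    refine Or.inr (Or.inl ⟨q.reverse, a, b, p.reverse, ?_, ?_⟩) <;>
      simp [List.reverse_append]
  · subst hu; subst hv
    refine Or.inr (Or.inr (Or.inl ⟨q.reverse, a, p.reverse, ?_, ?_⟩)) <;>
      simp [List.reverse_append]
  · subst hu; subst hv
    refine Or.inr (Or.inr (Or.inr ⟨q.reverse, a, p.reverse, ?_, ?_⟩)) <;>
      simp [List.reverse_append]

theorem pvLev_reverse_le_one (u v : List Char) :
    pvLev u.reverse v.reverse ≤ 1 ↔ pvLev u v ≤ 1 := by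
  constructor
  · intro h
    have := pvClose_reverse _ _ (pvLev_close _ _ h)
    simpa using pvClose_lev _ _ this
  · intro h
    exact pvClose_lev _ _ (pvClose_reverse _ _ (pvLev_close _ _ h))

-- ===== B's scan decides pvLev ≤ 1 =====

theorem pvB_strip_cons (a : Char) (u v : List Char) :
    pvB_strip (a :: u) (a :: v) = pvB_strip u v := by
  simp [pvB_strip]

theorem pvB_strip_mismatch (a b : Char) (u v : List Char) (hab : a ≠ b) :
    pvB_strip (a :: u) (b :: v) = (a :: u, b :: v) := by
  simp [pvB_strip, hab]

theorem pvB_within1_cons (a : Char) (u v : List Char) :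
    pvB_within1 (a :: u) (a :: v) = pvB_within1 u v := by
  unfold pvB_within1
  by_cases huv : u = v
  · simp [huv]
  · have hne : (a :: u) ≠ (a :: v) := by simp [huv]
    rw [if_neg hne, if_neg huv]
    simp only [List.length_cons, pvB_strip_cons, Nat.cast_add, Nat.cast_one]
    have e1 : ((u.length : Int) + 1 - ((v.length : Int) + 1)) = (u.length : Int) - v.length := by
      ring
    rw [e1]
    have e2 : (u.length + 1 = v.length + 1) ↔ (u.length = v.length) := by omega
    have e3 : (u.length + 1 > v.length + 1) ↔ (u.length > v.length) := by omega
    simp only [e2, e3]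

theorem pvLev_mismatch (a b : Char) (u v : List Char) (hab : a ≠ b) :
    pvLev (a :: u) (b :: v) ≤ 1 ↔ (u = b :: v ∨ a :: u = v ∨ u = v) := by
  rw [pvLev_cons_cons, if_neg hab]
  constructor
  · intro h
    have h3 : pvLev (a :: u) v = 0 ∨ pvLev u (b :: v) = 0 ∨ pvLev u v = 0 := by omega
    rcases h3 with h3 | h3 | h3
    · exact Or.inr (Or.inl ((pvLev_eq_zero _ _).mp h3))
    · exact Or.inl ((pvLev_eq_zero _ _).mp h3)
    · exact Or.inr (Or.inr ((pvLev_eq_zero _ _).mp h3))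
  · intro h
    rcases h with h | h | h
    · have h0 : pvLev u (b :: v) = 0 := (pvLev_eq_zero _ _).mpr h
      omega
    · have h0 : pvLev (a :: u) v = 0 := (pvLev_eq_zero _ _).mpr h
      omega
    · have h0 : pvLev u v = 0 := (pvLev_eq_zero _ _).mpr h
      omega

theorem pvB_within1_mismatch (a b : Char) (u v : List Char) (hab : a ≠ b) :
    pvB_within1 (a :: u) (b :: v) = true ↔ (u = b :: v ∨ a :: u = v ∨ u = v) := by
  unfold pvB_within1
  have hne : (a :: u) ≠ (b :: v) := by simp [hab]
  rw [if_neg hne]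
  simp only [List.length_cons, pvB_strip_mismatch a b u v hab, List.tail_cons,
    Nat.cast_add, Nat.cast_one]
  have e1 : ((u.length : Int) + 1 - ((v.length : Int) + 1)) = (u.length : Int) - (v.length : Int) := by
    ring
  rw [e1]
  split_ifs with g1 g2 g3
  · simp only [false_iff]
    rintro (h | h | h)
    · have := congrArg List.length h; simp at this; omega
    · have := congrArg List.length h; simp at this; omega
    · have := congrArg List.length h; omega
  · simp only [beq_iff_eq]
    constructor
    · exact fun h => Or.inr (Or.inr h)
    · rintro (h | h | h)
      · have := congrArg List.length h; simp at this; omega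
      · have := congrArg List.length h; simp at this; omega
      · exact h
  · simp only [beq_iff_eq]
    constructor
    · exact fun h => Or.inl h
    · rintro (h | h | h)
      · exact h
      · have := congrArg List.length h; simp at this; omega
      · have := congrArg List.length h; omega
  · simp only [beq_iff_eq]
    constructor
    · exact fun h => Or.inr (Or.inl h)
    · rintro (h | h | h)
      · have := congrArg List.length h; simp at this; omega
      · exact h
      · have := congrArg List.length h; omega

theorem pvB_within1_iff (u : List Char) : ∀ v, pvB_within1 u v = true ↔ pvLev u v ≤ 1 := by
  induction u with
  | nil =>
    intro v
    cases v with
    | nil => simp [pvB_within1, pvLev]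
    | cons b v =>
      cases v with
      | nil => simp [pvB_within1, pvB_strip, pvLev]
      | cons c w =>
        have hlhs : pvB_within1 [] (b :: c :: w) = false := by
          unfold pvB_within1
          rw [if_neg (by simp), if_pos (by simp; omega)]
        rw [hlhs]
        simp [pvLev]
  | cons a u ih =>
    intro v
    cases v with
    | nil =>
      cases u with
      | nil => simp [pvB_within1, pvB_strip, pvLev]
      | cons c w =>
        have hlhs : pvB_within1 (a :: c :: w) [] = false := by
          unfold pvB_within1
          rw [if_neg (by simp), if_pos (by simp; omega)]
        rw [hlhs]
        simp [pvLev]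
    | cons b v =>
      by_cases hab : a = b
      · subst hab
        rw [pvB_within1_cons, pvLev_cons_cons_le_one]
        exact ih v
      · rw [pvB_within1_mismatch a b u v hab, pvLev_mismatch a b u v hab]

-- ===== A's DP computes pvLev of the reversed strings =====

-- pvRowVals u v t = [lev u v, lev u (t₀::v), lev u (t₁::t₀::v), …]
def pvRowVals (u v : List Char) : List Char → List Int
  | [] => [(pvLev u v : Int)]
  | b :: t => (pvLev u v : Int) :: pvRowVals u (b :: v) t

theorem pvRowVals_head (u v : List Char) (t : List Char) :
    (pvRowVals u v t).headD 0 = (pvLev u v : Int) := by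
  cases t <;> simp [pvRowVals]

theorem pvRowVals_cons (u v : List Char) (t : List Char) :
    pvRowVals u v t = (pvLev u v : Int) :: (pvRowVals u v t).tail := by
  cases t <;> simp [pvRowVals]

theorem pvA_row_spec (a : Char) (t : List Char) : ∀ u v,
    pvA_row a t (pvRowVals u v t) (pvLev (a :: u) v : Int) = (pvRowVals (a :: u) v t).tail := by
  induction t with
  | nil => intro u v; simp [pvA_row, pvRowVals]
  | cons b t ih =>
    intro u v
    simp only [pvRowVals, pvA_row, pvRowVals_head, List.tail_cons]
    have hx : min ((pvLev (a :: u) v : Int) + 1)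
        (min ((pvLev u (b :: v) : Int) + 1)
          ((pvLev u v : Int) + (if a = b then (0 : Int) else 1)))
        = (pvLev (a :: u) (b :: v) : Int) := by
      rw [pvLev_cons_cons]
      by_cases hab : a = b <;> simp [hab]
    rw [hx, ih u (b :: v), ← pvRowVals_cons]

theorem pvA_loop_spec (t : List Char) (s : List Char) : ∀ u (i : Int), i = u.length →
    pvA_loop s t i (pvRowVals u [] t) = pvRowVals (s.reverse ++ u) [] t := by
  induction s with
  | nil => intro u i _; simp [pvA_loop]
  | cons a s ih =>
    intro u i hi
    simp only [pvA_loop]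
    have hlev : (pvLev (a :: u) [] : Int) = i + 1 := by
      rw [pvLev_nil_right]
      simp [hi]
    rw [show (i + 1 : Int) = (pvLev (a :: u) [] : Int) from hlev.symm,
      pvA_row_spec a t u [], ← pvRowVals_cons,
      ih (a :: u) _ (by simp [pvLev_nil_right])]
    simp

theorem pvRowVals_getElem (u : List Char) : ∀ (t v : List Char),
    (pvRowVals u v t)[t.length]? = some (pvLev u (t.reverse ++ v) : Int) := by
  intro t
  induction t with
  | nil => intro v; simp [pvRowVals]
  | cons b t ih =>
    intro v
    simp only [pvRowVals, List.length_cons, List.getElem?_cons_succ, ih (b :: v)]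
    simp [List.append_assoc]

theorem pvRowVals_init (t : List Char) : ∀ v : List Char,
    pvRowVals ([] : List Char) v t
      = PySem.List.pyRange (v.length : Int) ((v.length : Int) + (t.length : Int) + 1) 1 := by
  induction t with
  | nil =>
    intro v
    rw [PySem.List.pyRange_one_cons (by omega)]
    simp [pvRowVals, pvLev, PySem.List.pyRange]
  | cons b t ih =>
    intro v
    rw [PySem.List.pyRange_one_cons (by omega)]
    simp only [pvRowVals]
    rw [ih (b :: v)]
    simp only [pvLev, List.length_cons, Nat.cast_add, Nat.cast_one]
    ring_nf

theorem pvA_Levenstein_eq (g e : List Char) :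
    pvA_Levenstein g e = (pvLev g.reverse e.reverse : Int) := by
  unfold pvA_Levenstein
  by_cases heq : g = e
  · subst heq
    simp [pvLev_self]
  rw [if_neg heq]
  by_cases hg : g.length = 0
  · have : g = [] := List.length_eq_zero_iff.mp hg
    subst this
    simp [pvLev]
  rw [if_neg hg]
  by_cases he : e.length = 0
  · have : e = [] := List.length_eq_zero_iff.mp he
    subst this
    simp [pvLev_nil_right]
  rw [if_neg he]
  have hinit : PySem.List.pyRange 0 ((e.length : Int) + 1) 1
      = pvRowVals ([] : List Char) [] e := by
    have := pvRowVals_init e []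
    simpa using this.symm
  rw [hinit]
  show (PySem.List.pyGet? (pvA_loop g e 0 (pvRowVals ([] : List Char) [] e))
      ((e.length : Int))).getD 0 = (pvLev g.reverse e.reverse : Int)
  rw [pvA_loop_spec e g [] 0 (by simp), PySem.List.pyGet?_natCast]
  simp only [List.append_nil]
  rw [pvRowVals_getElem g.reverse e []]
  simp

-- per-ngram agreement
theorem pv_gram_eq (g e : List Char) :
    (decide (pvA_Levenstein g e < 2)) = pvB_within1 g e := by
  have hA := pvA_Levenstein_eq g e
  by_cases h : pvLev g e ≤ 1
  · have h2 : pvA_Levenstein g e < 2 := by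
      rw [hA]
      have := (pvLev_reverse_le_one g e).mpr h
      exact_mod_cast by omega
    simp [h2, (pvB_within1_iff g e).mpr h]
  · have h2 : ¬ pvA_Levenstein g e < 2 := by
      rw [hA]
      intro hc
      have : pvLev g.reverse e.reverse ≤ 1 := by exact_mod_cast by omega
      exact h ((pvLev_reverse_le_one g e).mp this)
    have hb : pvB_within1 g e = false := by
      cases hw : pvB_within1 g e
      · rfl
      · exact absurd ((pvB_within1_iff g e).mp hw) h
    simp [h2, hb]

-- the search loop: A's early-return recursion = B's any over the same windows
theorem pv_main_eq (e : List Char) (l : List Int) (f : Int → List (List Char)) :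
    pvA_main e (l.map f) = l.any (fun i => pvB_within1 (PySem.Chars.join " ".toList (f i)) e) := by
  induction l with
  | nil => simp [pvA_main]
  | cons i l ih =>
    have hb := pv_gram_eq (PySem.Chars.join " ".toList (f i)) e
    simp only [List.map_cons, List.any_cons, pvA_main, ih, ← hb]
    by_cases h : pvA_Levenstein (PySem.Chars.join " ".toList (f i)) e < 2
    · rw [if_pos h, decide_eq_true h]; simp
    · rw [if_neg h, decide_eq_false h]; simp

-- ===== VERDICT (by name: the statement is the Claim_ definition above) =====
theorem check_similarity_Levenstein_spec : Claim_equal_check_similarity_Levenstein := by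
  intro entity sentence _
  unfold Spec_check_similarity_Levenstein check_similarity_Levenstein
    check_similarity_Levenstein_alt pv_extract_ngram
  rw [pv_main_eq]
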